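-- pv_equiv track=rewrite | github.com/yumijipsaa/Plantdetection | find_algorithm.py | x_or_y_center_coordinates
-- ===== SOURCE A (Python) =====
-- def x_or_y_center_coordinates(x_coordinates, y_coordinates, width_or_height):
--     """
--         coordinates : x좌표 list -> other_coordinates : y좌표 list
--         coordinates : y좌표 list -> other_coordinates : x좌표 list
--     """
--
--     coordinates_no_dupl = list(set(y_coordinates)) if width_or_height == "height" else list(set(x_coordinates))
--
--     temp_list_1 = []
--     temp_list_2 = []
--     if width_or_height == "height":
--         for no_dulp in coordinates_no_dupl:     # slicing
--             for i in range(len(y_coordinates)):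
--                 if no_dulp == y_coordinates[i]:
--                     temp_list_1.append([x_coordinates[i], no_dulp])
--         # temp_list_1[N][1] : y coordinates of segmentation boundary (removed redundant elements)
--         # temp_list_1[N][0] : x coordinates of segmentation boundary
--         # temp_list_1[N][0]는 temp_list_1[M][0]과 중복되는 경우가 있다. (M != N인 임의의 수)
--
--         ## remove redundant x coordinates of segmentation boundary
--         for temp_coordi in temp_list_1:
--             if temp_coordi not in temp_list_2:
--                 temp_list_2.append(temp_coordi)
--             else:
--                 continue
--
--         temp_list_2.sort(key=lambda x: x[1])  	# sort according to y coordinates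
--         # temp_list_2[N][1] : y coordinates of segmentation boundary (removed redundant elements)
--         # temp_list_2[N][0] : x coordinates of segmentation boundary (removed redundant elements)
--         # 각각의 y coordiante 에 대응되는 x coodinate는 1개 또는 2개 이상이다.
--
--     else :
--         for no_dulp in coordinates_no_dupl:     # slicing
--             for i in range(len(x_coordinates)):
--                 if no_dulp == x_coordinates[i]:
--                     temp_list_1.append([no_dulp, y_coordinates[i]])
--
--         for temp_coordi in temp_list_1:
--             if temp_coordi not in temp_list_2:
--                 temp_list_2.append(temp_coordi)
--             else:
--                 continue
--
--         temp_list_2.sort()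
--
--
--     return temp_list_2
-- ===== SOURCE B (Python) =====
-- def x_or_y_center_coordinates(x_coordinates, y_coordinates, width_or_height):
--     # Group by the sort axis in one indexed pass, then emit along the sorted keys.
--     groups = {}
--     result = []
--     if width_or_height == "height":
--         for i in range(len(y_coordinates)):
--             yv = y_coordinates[i]
--             xv = x_coordinates[i]
--             g = groups.get(yv, [])
--             if xv not in g:
--                 groups[yv] = g + [xv]
--         for yv in sorted(groups):
--             for xv in groups[yv]:
--                 result.append([xv, yv])
--     else:
--         for i in range(len(x_coordinates)):
--             xv = x_coordinates[i]
--             yv = y_coordinates[i]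
--             g = groups.get(xv, [])
--             if yv not in g:
--                 groups[xv] = g + [yv]
--         for xv in sorted(groups):
--             for yv in sorted(groups[xv]):
--                 result.append([xv, yv])
--     return result
-- ===== Notes on version B (the rewrite author's own statement) =====
-- stated objective: faster
-- what changed: Replaces the per-unique-value rescans of the whole coordinate list plus a quadratic pair-dedup pass and a final sort of all pairs by a single indexed pass building a dict keyed on the sort axis (with per-key dedup), then emitting pairs by walking the sorted keys.
import Mathlib
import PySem

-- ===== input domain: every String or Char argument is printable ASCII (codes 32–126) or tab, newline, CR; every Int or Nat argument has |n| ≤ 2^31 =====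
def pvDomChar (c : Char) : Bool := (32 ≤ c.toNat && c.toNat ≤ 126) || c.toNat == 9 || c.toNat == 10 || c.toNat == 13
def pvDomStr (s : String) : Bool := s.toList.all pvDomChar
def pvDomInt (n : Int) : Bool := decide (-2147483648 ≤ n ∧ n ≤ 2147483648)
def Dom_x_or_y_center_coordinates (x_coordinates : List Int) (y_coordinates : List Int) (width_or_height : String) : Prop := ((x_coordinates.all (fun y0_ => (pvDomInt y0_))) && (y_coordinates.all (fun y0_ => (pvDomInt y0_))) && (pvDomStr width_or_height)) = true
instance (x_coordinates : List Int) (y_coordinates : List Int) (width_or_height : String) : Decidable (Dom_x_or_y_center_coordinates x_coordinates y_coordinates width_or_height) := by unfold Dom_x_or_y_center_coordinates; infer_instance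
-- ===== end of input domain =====

-- B replaces A's per-unique-value rescans, quadratic pair dedup and final sort of all pairs
-- by one indexed grouping pass into a dict keyed on the sort axis, emitting along the sorted keys.

-- ===== PORT A =====
def x_or_y_center_coordinates (x_coordinates : List Int) (y_coordinates : List Int) (width_or_height : String) : List (List Int) :=
  let coordinates_no_dupl : List Int :=
    if width_or_height == "height" then PySem.Set.ofList y_coordinates else PySem.Set.ofList x_coordinates
  if width_or_height == "height" then
    let temp_list_1 : List (List Int) := coordinates_no_dupl.foldl (fun acc no_dulp =>
      (PySem.List.pyRange 0 (y_coordinates.length : Int) 1).foldl (fun acc i =>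
        if no_dulp == PySem.List.pyGetD y_coordinates i 0 then
          acc ++ [[PySem.List.pyGetD x_coordinates i 0, no_dulp]]
        else acc) acc) []
    let temp_list_2 : List (List Int) := temp_list_1.foldl (fun acc p =>
      if p ∈ acc then acc else acc ++ [p]) []
    PySem.List.sorted temp_list_2 (fun p => PySem.List.pyGetD p 1 0) false
  else
    let temp_list_1 : List (List Int) := coordinates_no_dupl.foldl (fun acc no_dulp =>
      (PySem.List.pyRange 0 (x_coordinates.length : Int) 1).foldl (fun acc i =>
        if no_dulp == PySem.List.pyGetD x_coordinates i 0 then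
          acc ++ [[no_dulp, PySem.List.pyGetD y_coordinates i 0]]
        else acc) acc) []
    let temp_list_2 : List (List Int) := temp_list_1.foldl (fun acc p =>
      if p ∈ acc then acc else acc ++ [p]) []
    PySem.List.sorted temp_list_2 (fun p => p) false

-- ===== PORT B =====
def x_or_y_center_coordinates_alt (x_coordinates : List Int) (y_coordinates : List Int) (width_or_height : String) : List (List Int) :=
  if width_or_height == "height" then
    let groups : PySem.Dict Int (List Int) :=
      (PySem.List.pyRange 0 (y_coordinates.length : Int) 1).foldl (fun d i =>
        let yv := PySem.List.pyGetD y_coordinates i 0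
        let xv := PySem.List.pyGetD x_coordinates i 0
        let g := d.getD yv []
        if xv ∈ g then d else d.insert yv (g ++ [xv])) PySem.Dict.empty
    (PySem.List.sorted groups.keys (fun k => k) false).foldl (fun res yv =>
      (groups.getD yv []).foldl (fun res xv => res ++ [[xv, yv]]) res) []
  else
    let groups : PySem.Dict Int (List Int) :=
      (PySem.List.pyRange 0 (x_coordinates.length : Int) 1).foldl (fun d i =>
        let xv := PySem.List.pyGetD x_coordinates i 0
        let yv := PySem.List.pyGetD y_coordinates i 0
        let g := d.getD xv []
        if yv ∈ g then d else d.insert xv (g ++ [yv])) PySem.Dict.empty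
    (PySem.List.sorted groups.keys (fun k => k) false).foldl (fun res xv =>
      (PySem.List.sorted (groups.getD xv []) (fun k => k) false).foldl (fun res yv => res ++ [[xv, yv]]) res) []

-- ===== PRECONDITION & SPEC =====
-- Pre_ excludes exactly the mismatched-length inputs on which A raises IndexError
-- (indexing the other coordinate list past its end).
def Pre_x_or_y_center_coordinates (x_coordinates : List Int) (y_coordinates : List Int) (width_or_height : String) : Prop :=
  if width_or_height = "height" then y_coordinates.length ≤ x_coordinates.length
  else x_coordinates.length ≤ y_coordinates.length
instance (x_coordinates : List Int) (y_coordinates : List Int) (width_or_height : String) : Decidable (Pre_x_or_y_center_coordinates x_coordinates y_coordinates width_or_height) := by unfold Pre_x_or_y_center_coordinates; infer_instance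
def pvWitness_x_or_y_center_coordinates : List Int × List Int × String := ([3, 1, 3], [5, 4, 5], "height")

def Spec_x_or_y_center_coordinates (x_coordinates : List Int) (y_coordinates : List Int) (width_or_height : String) (out : List (List Int)) : Prop := out = x_or_y_center_coordinates_alt x_coordinates y_coordinates width_or_height
instance (x_coordinates : List Int) (y_coordinates : List Int) (width_or_height : String) (out : List (List Int)) : Decidable (Spec_x_or_y_center_coordinates x_coordinates y_coordinates width_or_height out) := by unfold Spec_x_or_y_center_coordinates; infer_instance

-- ===== CLAIM (what is proved, stated in full; the proofs are below) =====
def Claim_equal_x_or_y_center_coordinates : Prop := ∀ (x_coordinates : List Int) (y_coordinates : List Int) (width_or_height : String), Dom_x_or_y_center_coordinates x_coordinates y_coordinates width_or_height → Pre_x_or_y_center_coordinates x_coordinates y_coordinates width_or_height → Spec_x_or_y_center_coordinates x_coordinates y_coordinates width_or_height (x_or_y_center_coordinates x_coordinates y_coordinates width_or_height)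

-- ===== LEMMAS AND PROOFS =====


theorem pv_idx_zip_aux {γ : Type} (x y : List Int) (f : γ → Int → Int → γ)
    (h : y.length ≤ x.length) :
    ∀ (n k : Nat) (init : γ), k + n = y.length →
    (PySem.List.pyRange (k : Int) (y.length : Int) 1).foldl
      (fun acc i => f acc (PySem.List.pyGetD x i 0) (PySem.List.pyGetD y i 0)) init
    = ((x.drop k).zip (y.drop k)).foldl (fun acc p => f acc p.1 p.2) init := by
  intro n
  induction n with
  | zero =>
    intro k init hk
    rw [PySem.List.pyRange_one_eq_nil (by omega)]
    rw [List.drop_of_length_le (by omega : y.length ≤ k)]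
    simp
  | succ n ih =>
    intro k init hk
    have hky : k < y.length := by omega
    have hkx : k < x.length := by omega
    rw [PySem.List.pyRange_one_cons (by exact_mod_cast hky)]
    rw [List.foldl_cons]
    have e1 : PySem.List.pyGetD x (k : Int) 0 = x[k] := by
      rw [PySem.List.pyGetD_natCast]; simp [List.getD, hkx]
    have e2 : PySem.List.pyGetD y (k : Int) 0 = y[k] := by
      rw [PySem.List.pyGetD_natCast]; simp [List.getD, hky]
    have e3 : ((k : Int) + 1) = ((k + 1 : Nat) : Int) := by push_cast; ring
    rw [e1, e2, e3, ih (k+1) _ (by omega)]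
    rw [show (List.drop k x).zip (List.drop k y)
          = (x[k], y[k]) :: (List.drop (k+1) x).zip (List.drop (k+1) y) from by
        rw [List.drop_eq_getElem_cons hkx, List.drop_eq_getElem_cons hky]; rfl,
      List.foldl_cons]

theorem pv_foldl_idx_zip {γ : Type} (x y : List Int) (f : γ → Int → Int → γ) (init : γ)
    (h : y.length ≤ x.length) :
    (PySem.List.pyRange 0 (y.length : Int) 1).foldl
      (fun acc i => f acc (PySem.List.pyGetD x i 0) (PySem.List.pyGetD y i 0)) init
    = (x.zip y).foldl (fun acc p => f acc p.1 p.2) init := by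
  have := pv_idx_zip_aux x y f h y.length 0 init (by omega)
  simpa using this

theorem pv_foldl_mem_dedup {α : Type} [BEq α] [LawfulBEq α] [DecidableEq α] (l : List α) :
    l.foldl (fun acc p => if p ∈ acc then acc else acc ++ [p]) [] = PySem.Set.ofList l := by
  rw [PySem.Set.ofList_eq_foldl]
  congr 1
  funext acc p
  simp [PySem.Set.add, PySem.Set.contains]

theorem pv_add_disjoint_aux {α : Type} [BEq α] [LawfulBEq α] (bs : List α) :
    ∀ (s t : List α), (∀ b ∈ bs, b ∉ s) →
    bs.foldl PySem.Set.add (s ++ t) = s ++ bs.foldl PySem.Set.add t := by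
  induction bs with
  | nil => intro s t _; simp
  | cons b bs ih =>
    intro s t hdisj
    simp only [List.foldl_cons]
    have hb : b ∉ s := hdisj b (by simp)
    have : PySem.Set.add (s ++ t) b = s ++ PySem.Set.add t b := by
      simp only [PySem.Set.add, PySem.Set.contains]
      by_cases h : b ∈ t
      · simp [h, hb]
      · simp [h, hb]
    rw [this, ih s _ (fun c hc => hdisj c (by simp [hc]))]

theorem pv_ofList_append_disjoint {α : Type} [BEq α] [LawfulBEq α] (as bs : List α)
    (h : ∀ b ∈ bs, b ∉ as) :
    PySem.Set.ofList (as ++ bs) = PySem.Set.ofList as ++ PySem.Set.ofList bs := by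
  rw [PySem.Set.ofList_eq_foldl, PySem.Set.ofList_eq_foldl, PySem.Set.ofList_eq_foldl,
    List.foldl_append]
  have h2 : ∀ b ∈ bs, b ∉ PySem.Set.ofList as := by
    intro b hb
    rw [PySem.Set.mem_ofList]
    exact h b hb
  have := pv_add_disjoint_aux bs (PySem.Set.ofList as) [] (by
    intro b hb; have := h2 b hb; rwa [PySem.Set.ofList_eq_foldl] at this)
  simpa [PySem.Set.ofList_eq_foldl] using this

theorem pv_ofList_map_aux {α β : Type} [BEq α] [LawfulBEq α] [BEq β] [LawfulBEq β]
    (f : α → β) (hf : Function.Injective f) (l : List α) :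
    ∀ (s : List α), (l.map f).foldl PySem.Set.add (s.map f) = (l.foldl PySem.Set.add s).map f := by
  induction l with
  | nil => intro s; simp
  | cons a l ih =>
    intro s
    simp only [List.map_cons, List.foldl_cons]
    have : PySem.Set.add (s.map f) (f a) = (PySem.Set.add s a).map f := by
      simp only [PySem.Set.add, PySem.Set.contains]
      by_cases h : a ∈ s
      · simp [h, List.mem_map.mpr ⟨a, h, rfl⟩]
      · have : f a ∉ s.map f := by
          intro hm
          obtain ⟨c, hc, hfc⟩ := List.mem_map.mp hm
          exact h (hf hfc ▸ hc)
        simp [h, this]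
    rw [this, ih]

theorem pv_ofList_map_inj {α β : Type} [BEq α] [LawfulBEq α] [BEq β] [LawfulBEq β]
    (f : α → β) (hf : Function.Injective f) (l : List α) :
    PySem.Set.ofList (l.map f) = (PySem.Set.ofList l).map f := by
  rw [PySem.Set.ofList_eq_foldl, PySem.Set.ofList_eq_foldl]
  simpa using pv_ofList_map_aux f hf l []

theorem pv_ofList_flatMap {β : Type} [BEq β] [LawfulBEq β] (ks : List Int) (g : Int → List β)
    (K : β → Int) (hnd : ks.Nodup) (hg : ∀ u, ∀ b ∈ g u, K b = u) :
    PySem.Set.ofList (ks.flatMap g) = ks.flatMap (fun u => PySem.Set.ofList (g u)) := by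
  induction ks with
  | nil => simp [PySem.Set.ofList]
  | cons k ks ih =>
    rw [List.flatMap_cons, List.flatMap_cons]
    rw [pv_ofList_append_disjoint]
    · rw [ih (List.nodup_cons.mp hnd).2]
    · intro b hb hbk
      obtain ⟨u, hu, hbu⟩ := List.mem_flatMap.mp hb
      have h1 : K b = u := hg u b hbu
      have h2 : K b = k := hg k b hbk
      have : u ≠ k := fun he => (List.nodup_cons.mp hnd).1 (he ▸ hu)
      exact this (h1 ▸ h2)

theorem pv_filter_flatMap {β : Type} (ks : List Int) (g : Int → List β) (K : β → Int)
    (hnd : ks.Nodup) (hg : ∀ u, ∀ b ∈ g u, K b = u) (k : Int) :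
    (ks.flatMap g).filter (fun b => K b == k) = if k ∈ ks then g k else [] := by
  induction ks with
  | nil => simp
  | cons u ks ih =>
    rw [List.flatMap_cons, List.filter_append, ih (List.nodup_cons.mp hnd).2]
    by_cases hu : u = k
    · subst hu
      have h1 : (g u).filter (fun b => K b == u) = g u :=
        List.filter_eq_self.mpr (fun b hb => by simp [hg u b hb])
      have h2 : u ∉ ks := (List.nodup_cons.mp hnd).1
      simp [h1, h2]
    · have h1 : (g u).filter (fun b => K b == k) = [] := by
        apply List.filter_eq_nil_iff.mpr
        intro b hb; simp [hg u b hb, hu]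
      by_cases hk : k ∈ ks <;> simp [h1, hk, Ne.symm hu]

theorem pv_pairwise_flatMap {β : Type} (ks : List Int) (g : Int → List β) (R : β → β → Prop)
    (P : Int → Int → Prop) (hks : ks.Pairwise P)
    (hin : ∀ u ∈ ks, (g u).Pairwise R)
    (hacross : ∀ u v, P u v → ∀ a ∈ g u, ∀ b ∈ g v, R a b) :
    (ks.flatMap g).Pairwise R := by
  induction ks with
  | nil => simp
  | cons u ks ih =>
    rw [List.flatMap_cons]
    apply List.pairwise_append.mpr
    refine ⟨hin u (by simp), ih (List.pairwise_cons.mp hks).2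
      (fun v hv => hin v (by simp [hv])), ?_⟩
    intro a ha b hb
    obtain ⟨v, hv, hbv⟩ := List.mem_flatMap.mp hb
    exact hacross u v ((List.pairwise_cons.mp hks).1 v hv) a ha b hbv

theorem pv_insertBy_nil {β : Type} (bf : β → β → Bool) (x : β) :
    PySem.List.insertBy bf x [] = [x] := by simp [PySem.List.insertBy]

theorem pv_insertBy_cons {β : Type} (bf : β → β → Bool) (x y : β) (ys : List β) :
    PySem.List.insertBy bf x (y :: ys)
    = if bf x y then x :: y :: ys else y :: PySem.List.insertBy bf x ys := by
  simp [PySem.List.insertBy]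

theorem pv_insertBy_pairwise {β : Type} (key : β → Int) (x : β) (acc : List β)
    (h : acc.Pairwise (fun a b => key a ≤ key b)) :
    (PySem.List.insertBy (fun a b => decide (key a < key b)) x acc).Pairwise (fun a b => key a ≤ key b) := by
  induction acc with
  | nil => simp [pv_insertBy_nil]
  | cons y ys ih =>
    rw [pv_insertBy_cons]
    obtain ⟨hy, hys⟩ := List.pairwise_cons.mp h
    by_cases hlt : key x < key y
    · simp only [hlt, decide_true, if_true]
      apply List.pairwise_cons.mpr
      refine ⟨?_, h⟩
      intro z hz
      rcases List.mem_cons.mp hz with rfl | hz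
      · exact le_of_lt hlt
      · exact le_trans (le_of_lt hlt) (hy z hz)
    · simp only [hlt, decide_false, Bool.false_eq_true, if_false]
      apply List.pairwise_cons.mpr
      refine ⟨?_, ih hys⟩
      intro z hz
      rcases (PySem.List.mem_insertBy _ _ _ _).mp hz with rfl | hz
      · exact le_of_not_gt hlt
      · exact hy z hz

theorem pv_insertBy_filter {β : Type} (key : β → Int) (k : Int) (x : β) (acc : List β)
    (h : acc.Pairwise (fun a b => key a ≤ key b)) :
    (PySem.List.insertBy (fun a b => decide (key a < key b)) x acc).filter (fun a => key a == k)
    = if key x == k then acc.filter (fun a => key a == k) ++ [x] else acc.filter (fun a => key a == k) := by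
  induction acc with
  | nil => by_cases hx : key x == k <;> simp [pv_insertBy_nil, hx]
  | cons y ys ih =>
    rw [pv_insertBy_cons]
    obtain ⟨hy, hys⟩ := List.pairwise_cons.mp h
    by_cases hlt : key x < key y
    · simp only [hlt, decide_true, if_true]
      by_cases hx : key x = k
      · have hrest : (y :: ys).filter (fun a => key a == k) = [] := by
          apply List.filter_eq_nil_iff.mpr
          intro b hb
          have : key y ≤ key b := by
            rcases List.mem_cons.mp hb with rfl | hb
            · exact le_refl _
            · exact hy b hb
          simp only [beq_iff_eq]
          omega
        simp [hx, hrest]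
      · have hxb : (key x == k) = false := by simp [hx]
        simp [hxb]
    · simp only [hlt, decide_false, Bool.false_eq_true, if_false]
      rw [List.filter_cons, List.filter_cons, ih hys]
      by_cases hx : key x == k <;> by_cases hyk : key y == k <;> simp [hx, hyk]

theorem pv_sorted_filter {β : Type} (key : β → Int) (k : Int) (xs : List β) :
    (PySem.List.sorted xs key false).filter (fun a => key a == k) = xs.filter (fun a => key a == k) := by
  rw [PySem.List.sorted_eq_foldl_insertBy]
  suffices h : ∀ (acc : List β), acc.Pairwise (fun a b => key a ≤ key b) →
      (xs.foldl (fun acc x => PySem.List.insertBy (fun a b => decide (key a < key b)) x acc) acc).filter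
        (fun a => key a == k)
      = acc.filter (fun a => key a == k) ++ xs.filter (fun a => key a == k) by
    simpa using h [] (by simp)
  induction xs with
  | nil => intro acc _; simp
  | cons x xs ih =>
    intro acc hacc
    rw [List.foldl_cons, ih _ (pv_insertBy_pairwise key x acc hacc),
      pv_insertBy_filter key k x acc hacc, List.filter_cons]
    by_cases hx : key x == k <;> simp [hx]

theorem pv_eq_of_filter_eq {β : Type} (key : β → Int) :
    ∀ (ys zs : List β), ys.Pairwise (fun a b => key a ≤ key b) → zs.Pairwise (fun a b => key a ≤ key b) →
    (∀ k, ys.filter (fun a => key a == k) = zs.filter (fun a => key a == k)) → ys = zs := by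
  intro ys
  induction ys with
  | nil =>
    intro zs _ _ hf
    cases zs with
    | nil => rfl
    | cons b zs =>
      exfalso
      have := hf (key b)
      simp at this
  | cons a ys ih =>
    intro zs hys hzs hf
    cases zs with
    | nil =>
      exfalso
      have := hf (key a)
      simp at this
    | cons b zs =>
      obtain ⟨ha, hys'⟩ := List.pairwise_cons.mp hys
      obtain ⟨hb, hzs'⟩ := List.pairwise_cons.mp hzs
      have hkey : key a = key b := by
        by_contra hne
        rcases lt_or_gt_of_ne hne with hlt | hgt
        · have := hf (key a)
          rw [List.filter_cons_of_pos (by simp)] at this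
          rw [List.filter_cons_of_neg (by simp; omega)] at this
          have hnil : zs.filter (fun c => key c == key a) = [] := by
            apply List.filter_eq_nil_iff.mpr
            intro c hc
            have := hb c hc
            simp only [beq_iff_eq]; omega
          rw [hnil] at this
          simp at this
        · have := hf (key b)
          rw [List.filter_cons_of_neg (by simp; omega)] at this
          rw [List.filter_cons_of_pos (by simp)] at this
          have hnil : ys.filter (fun c => key c == key b) = [] := by
            apply List.filter_eq_nil_iff.mpr
            intro c hc
            have := ha c hc
            simp only [beq_iff_eq]; omega
          rw [hnil] at this
          simp at this
      have hab : a = b ∧ ys.filter (fun c => key c == key a) = zs.filter (fun c => key c == key a) := by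
        have := hf (key a)
        rw [List.filter_cons_of_pos (by simp), List.filter_cons_of_pos (by simp [hkey])] at this
        exact ⟨List.head_eq_of_cons_eq this, List.tail_eq_of_cons_eq this⟩
      refine hab.1 ▸ congrArg (a :: ·) (ih zs hys' hzs' ?_)
      intro k
      by_cases hk : k = key a
      · exact hk ▸ hab.2
      · have := hf k
        have hpa : ((key a == k) = false) := by simp; exact fun he => hk he.symm
        have hpb : ((key b == k) = false) := by simp; exact fun he => hk (by omega)
        rw [List.filter_cons, List.filter_cons, hpa, hpb] at this
        simpa using this
theorem pv_sorted_flatMap {β : Type} (ks : List Int) (g : Int → List β) (key : β → Int)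
    (hnd : ks.Nodup) (hg : ∀ u, ∀ b ∈ g u, key b = u) :
    PySem.List.sorted (ks.flatMap g) key false
    = (PySem.List.sorted ks (fun u => u) false).flatMap g := by
  have hperm : (PySem.List.sorted ks (fun u => u) false).Perm ks := PySem.List.sorted_perm ks _ false
  have hndS : (PySem.List.sorted ks (fun u => u) false).Nodup := (hperm.symm).nodup hnd
  have hS : (PySem.List.sorted ks (fun u => u) false).Pairwise (· < ·) := by
    have h1 := PySem.List.sorted_pairwise ks (fun u => u)
    exact (h1.and hndS).imp (fun h => lt_of_le_of_ne h.1 h.2)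
  apply pv_eq_of_filter_eq key
  · exact PySem.List.sorted_pairwise _ _
  · apply pv_pairwise_flatMap _ _ _ (· < ·) hS
    · intro u _
      exact List.pairwise_of_forall_mem_list (fun a ha b hb => by
        rw [hg u a ha, hg u b hb])
    · intro u v huv a ha b hb
      rw [hg u a ha, hg v b hb]; exact le_of_lt huv
  · intro k
    rw [pv_sorted_filter, pv_filter_flatMap ks g key hnd hg k,
      pv_filter_flatMap _ g key hndS hg k]
    simp [PySem.List.mem_sorted]

theorem pv_keys_insert (d : PySem.Dict Int (List Int)) (k : Int) (v : List Int) :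
    (d.insert k v).keys = PySem.Set.add d.keys k := by
  have := PySem.Dict.keys_foldl_insert [k] (fun _ _ => v) d
  simpa [PySem.Set.update] using this

theorem pv_ofList_append_singleton {α : Type} [BEq α] [LawfulBEq α] (l : List α) (a : α) :
    PySem.Set.ofList (l ++ [a]) = PySem.Set.add (PySem.Set.ofList l) a := by
  rw [PySem.Set.ofList_eq_foldl, PySem.Set.ofList_eq_foldl, List.foldl_append]
  rfl

theorem pv_dict_fold (qs : List (Int × Int)) :
    (qs.foldl (fun d p =>
        let g := d.getD p.2 []
        if p.1 ∈ g then d else d.insert p.2 (g ++ [p.1])) (PySem.Dict.empty : PySem.Dict Int (List Int))).keys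
      = PySem.Set.ofList (qs.map Prod.snd)
    ∧ ∀ u, (qs.foldl (fun d p =>
        let g := d.getD p.2 []
        if p.1 ∈ g then d else d.insert p.2 (g ++ [p.1])) (PySem.Dict.empty : PySem.Dict Int (List Int))).getD u []
      = PySem.List.dedup ((qs.filter (fun p => p.2 == u)).map Prod.fst) := by
  induction qs using List.reverseRecOn with
  | nil => constructor
           · simp [PySem.Dict.keys_empty, PySem.Set.ofList]
           · intro u; simp [PySem.Dict.getD_empty, PySem.List.dedup, PySem.Set.ofList]
  | append_singleton qs p ih =>
    obtain ⟨hk, hg⟩ := ih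
    rw [List.foldl_append, List.foldl_cons, List.foldl_nil]
    set D := qs.foldl (fun d p =>
        let g := d.getD p.2 []
        if p.1 ∈ g then d else d.insert p.2 (g ++ [p.1])) (PySem.Dict.empty : PySem.Dict Int (List Int)) with hD
    simp only []
    by_cases hmem : p.1 ∈ D.getD p.2 []
    · rw [if_pos hmem]
      have hkey : p.2 ∈ qs.map Prod.snd := by
        have := hg p.2
        rw [this] at hmem
        have : p.1 ∈ (qs.filter (fun q => q.2 == p.2)).map Prod.fst := by
          have := (PySem.List.mem_dedup _ _).mp hmem
          exact this
        obtain ⟨q, hq, _⟩ := List.mem_map.mp this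
        exact List.mem_map.mpr ⟨q, (List.mem_filter.mp hq).1, by
          have := (List.mem_filter.mp hq).2; simpa using this⟩
      constructor
      · rw [hk, List.map_append, List.map_cons, List.map_nil, pv_ofList_append_singleton]
        simp only [PySem.Set.add]
        rw [if_pos]
        simp only [PySem.Set.contains]
        rw [List.contains_eq_mem]
        simp [PySem.Set.mem_ofList, hkey]
      · intro u
        rw [hg u, List.filter_append, List.filter_cons, List.filter_nil]
        by_cases hu : p.2 == u
        · have hu' : p.2 = u := by simpa using hu
          simp only [hu, if_pos, List.map_append, List.map_cons, List.map_nil]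
          rw [PySem.List.dedup_eq_ofList, PySem.List.dedup_eq_ofList, pv_ofList_append_singleton]
          simp only [PySem.Set.add]
          rw [if_pos]
          simp only [PySem.Set.contains, List.contains_eq_mem]
          rw [← PySem.List.dedup_eq_ofList]
          subst hu'
          have := hg p.2
          rw [this] at hmem
          simpa using hmem
        · simp [hu]
    · rw [if_neg hmem]
      constructor
      · rw [pv_keys_insert, hk, List.map_append, List.map_cons, List.map_nil,
          pv_ofList_append_singleton]
      · intro u
        by_cases hu : p.2 = u
        · subst hu
          rw [PySem.Dict.getD_insert_self, hg p.2, List.filter_append, List.filter_cons,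
            List.filter_nil]
          simp only [beq_self_eq_true, if_pos, List.map_append, List.map_cons, List.map_nil]
          rw [PySem.List.dedup_eq_ofList, PySem.List.dedup_eq_ofList, pv_ofList_append_singleton]
          simp only [PySem.Set.add]
          rw [if_neg]
          simp only [PySem.Set.contains, List.contains_eq_mem]
          rw [← PySem.List.dedup_eq_ofList]
          intro hc
          exact hmem (by rw [hg p.2]; simpa using hc)
        · rw [PySem.Dict.getD_insert_of_ne _ _ _ (Ne.symm hu), hg u, List.filter_append,
            List.filter_cons, List.filter_nil]
          have : (p.2 == u) = false := by simpa using hu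
          simp [this]

-- per-u blocks of the common normal form
def pvBlockH (qs : List (Int × Int)) (u : Int) : List (List Int) :=
  (PySem.List.dedup ((qs.filter (fun p => p.2 == u)).map Prod.fst)).map (fun v => [v, u])
def pvBlockW (qs : List (Int × Int)) (u : Int) : List (List Int) :=
  (PySem.List.dedup ((qs.filter (fun p => p.2 == u)).map Prod.fst)).map (fun v => [u, v])
def pvBlockWS (qs : List (Int × Int)) (u : Int) : List (List Int) :=
  (PySem.List.sorted (PySem.List.dedup ((qs.filter (fun p => p.2 == u)).map Prod.fst)) (fun v => v) false).map (fun v => [u, v])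

theorem pv_beq_comm (a b : Int) : (a == b) = (b == a) := by
  by_cases h : a = b
  · simp [h]
  · simp [h, Ne.symm h]

theorem pv_A_height (x y : List Int) (h : y.length ≤ x.length) :
    x_or_y_center_coordinates x y "height"
    = (PySem.List.sorted (PySem.Set.ofList y) (fun u => u) false).flatMap (pvBlockH (x.zip y)) := by
  show PySem.List.sorted
      (((PySem.Set.ofList y).foldl (fun acc no_dulp =>
        (PySem.List.pyRange 0 (y.length : Int) 1).foldl (fun acc i =>
          if no_dulp == PySem.List.pyGetD y i 0 then
            acc ++ [[PySem.List.pyGetD x i 0, no_dulp]]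
          else acc) acc) []).foldl (fun acc p => if p ∈ acc then acc else acc ++ [p]) [])
      (fun p => PySem.List.pyGetD p 1 0) false
    = _
  have hT1 : (PySem.Set.ofList y).foldl (fun acc no_dulp =>
        (PySem.List.pyRange 0 (y.length : Int) 1).foldl (fun acc i =>
          if no_dulp == PySem.List.pyGetD y i 0 then
            acc ++ [[PySem.List.pyGetD x i 0, no_dulp]]
          else acc) acc) []
      = (PySem.Set.ofList y).flatMap (fun u =>
          ((x.zip y).filter (fun p => p.2 == u)).map (fun p => [p.1, u])) := by
    have hinner : ∀ (u : Int) (acc : List (List Int)),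
        (PySem.List.pyRange 0 (y.length : Int) 1).foldl (fun acc i =>
          if u == PySem.List.pyGetD y i 0 then
            acc ++ [[PySem.List.pyGetD x i 0, u]]
          else acc) acc
        = acc ++ ((x.zip y).filter (fun p => p.2 == u)).map (fun p => [p.1, u]) := by
      intro u acc
      rw [pv_foldl_idx_zip x y
        (fun acc xv yv => if u == yv then acc ++ [[xv, u]] else acc) acc h]
      rw [PySem.List.foldl_append_if (fun p => u == p.2) (fun p => [p.1, u]) (x.zip y) acc]
      congr 2
      apply List.filter_congr
      intro p _
      exact pv_beq_comm u p.2
    calc (PySem.Set.ofList y).foldl (fun acc no_dulp =>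
        (PySem.List.pyRange 0 (y.length : Int) 1).foldl (fun acc i =>
          if no_dulp == PySem.List.pyGetD y i 0 then
            acc ++ [[PySem.List.pyGetD x i 0, no_dulp]]
          else acc) acc) []
        = (PySem.Set.ofList y).foldl (fun acc u =>
            acc ++ ((x.zip y).filter (fun p => p.2 == u)).map (fun p => [p.1, u])) [] := by
          apply PySem.List.foldl_congr_mem
          intro acc u _
          exact hinner u acc
      _ = (PySem.Set.ofList y).flatMap (fun u =>
            ((x.zip y).filter (fun p => p.2 == u)).map (fun p => [p.1, u])) := by
          rw [PySem.List.foldl_append_eq_flatMap]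
          simp
  rw [hT1, pv_foldl_mem_dedup]
  have hg0 : ∀ (u : Int) (b : List Int),
      b ∈ (fun u => ((x.zip y).filter (fun p => p.2 == u)).map (fun p => [p.1, u])) u →
      PySem.List.pyGetD b 1 0 = u := by
    intro u b hb
    obtain ⟨p, _, rfl⟩ := List.mem_map.mp hb
    rfl
  rw [pv_ofList_flatMap (PySem.Set.ofList y) _ (fun b => PySem.List.pyGetD b 1 0)
    (PySem.Set.nodup_ofList y) hg0]
  have hblock : (fun u => PySem.Set.ofList
        (((x.zip y).filter (fun p => p.2 == u)).map (fun p => [p.1, u])))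
      = pvBlockH (x.zip y) := by
    funext u
    unfold pvBlockH
    rw [PySem.List.dedup_eq_ofList,
      show ((x.zip y).filter (fun p => p.2 == u)).map (fun p => ([p.1, u] : List Int))
        = (((x.zip y).filter (fun p => p.2 == u)).map Prod.fst).map (fun v => [v, u]) by
          rw [List.map_map]; rfl,
      pv_ofList_map_inj (fun v => ([v, u] : List Int)) (fun a b hab => by simpa using hab)]
  rw [hblock]
  apply pv_sorted_flatMap
  · exact PySem.Set.nodup_ofList y
  · intro u b hb
    unfold pvBlockH at hb
    obtain ⟨v, _, rfl⟩ := List.mem_map.mp hb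
    rfl

theorem pv_B_height (x y : List Int) (h : y.length ≤ x.length) :
    x_or_y_center_coordinates_alt x y "height"
    = (PySem.List.sorted (PySem.Set.ofList y) (fun u => u) false).flatMap (pvBlockH (x.zip y)) := by
  have hD : (PySem.List.pyRange 0 (y.length : Int) 1).foldl (fun d i =>
        let yv := PySem.List.pyGetD y i 0
        let xv := PySem.List.pyGetD x i 0
        let g := d.getD yv []
        if xv ∈ g then d else d.insert yv (g ++ [xv])) PySem.Dict.empty
      = (x.zip y).foldl (fun d p =>
        let g := d.getD p.2 []
        if p.1 ∈ g then d else d.insert p.2 (g ++ [p.1])) PySem.Dict.empty :=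
    pv_foldl_idx_zip x y
      (fun d xv yv => if xv ∈ d.getD yv [] then d else d.insert yv (d.getD yv [] ++ [xv]))
      PySem.Dict.empty h
  unfold x_or_y_center_coordinates_alt
  simp only [beq_self_eq_true, if_true]
  rw [hD]
  obtain ⟨hk, hg⟩ := pv_dict_fold (x.zip y)
  rw [hk, List.map_snd_zip h]
  have hemit : ∀ (S : List Int) (D : PySem.Dict Int (List Int)),
      S.foldl (fun res yv => (D.getD yv []).foldl (fun res xv => res ++ [[xv, yv]]) res) []
      = S.flatMap (fun u => (D.getD u []).map (fun v => [v, u])) := by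
    intro S D
    calc S.foldl (fun res yv => (D.getD yv []).foldl (fun res xv => res ++ [[xv, yv]]) res) []
        = S.foldl (fun res yv => res ++ (D.getD yv []).map (fun v => [v, yv])) [] := by
          apply PySem.List.foldl_congr_mem
          intro res u _
          exact PySem.List.foldl_append_singleton_eq_map (fun v => [v, u]) (D.getD u []) res
      _ = S.flatMap (fun u => (D.getD u []).map (fun v => [v, u])) := by
          rw [PySem.List.foldl_append_eq_flatMap]; simp
  rw [hemit]
  apply List.flatMap_congr  -- name guess
  intro u _
  rw [hg u]
  rfl

theorem pv_A_else (x y : List Int) (w : String) (hw : (w == "height") = false)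
    (h : x.length ≤ y.length) :
    x_or_y_center_coordinates x y w
    = (PySem.List.sorted (PySem.Set.ofList x) (fun u => u) false).flatMap (pvBlockWS (y.zip x)) := by
  unfold x_or_y_center_coordinates
  simp only [hw, Bool.false_eq_true, if_false]
  have hT1 : (PySem.Set.ofList x).foldl (fun acc no_dulp =>
        (PySem.List.pyRange 0 (x.length : Int) 1).foldl (fun acc i =>
          if no_dulp == PySem.List.pyGetD x i 0 then
            acc ++ [[no_dulp, PySem.List.pyGetD y i 0]]
          else acc) acc) []
      = (PySem.Set.ofList x).flatMap (fun u =>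
          ((y.zip x).filter (fun p => p.2 == u)).map (fun p => [u, p.1])) := by
    have hinner : ∀ (u : Int) (acc : List (List Int)),
        (PySem.List.pyRange 0 (x.length : Int) 1).foldl (fun acc i =>
          if u == PySem.List.pyGetD x i 0 then
            acc ++ [[u, PySem.List.pyGetD y i 0]]
          else acc) acc
        = acc ++ ((y.zip x).filter (fun p => p.2 == u)).map (fun p => [u, p.1]) := by
      intro u acc
      rw [pv_foldl_idx_zip y x
        (fun acc yv xv => if u == xv then acc ++ [[u, yv]] else acc) acc h]
      rw [PySem.List.foldl_append_if (fun p => u == p.2) (fun p => [u, p.1]) (y.zip x) acc]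
      congr 2
      apply List.filter_congr
      intro p _
      exact pv_beq_comm u p.2
    calc (PySem.Set.ofList x).foldl (fun acc no_dulp =>
        (PySem.List.pyRange 0 (x.length : Int) 1).foldl (fun acc i =>
          if no_dulp == PySem.List.pyGetD x i 0 then
            acc ++ [[no_dulp, PySem.List.pyGetD y i 0]]
          else acc) acc) []
        = (PySem.Set.ofList x).foldl (fun acc u =>
            acc ++ ((y.zip x).filter (fun p => p.2 == u)).map (fun p => [u, p.1])) [] := by
          apply PySem.List.foldl_congr_mem
          intro acc u _
          exact hinner u acc
      _ = (PySem.Set.ofList x).flatMap (fun u =>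
            ((y.zip x).filter (fun p => p.2 == u)).map (fun p => [u, p.1])) := by
          rw [PySem.List.foldl_append_eq_flatMap]
          simp
  rw [hT1, pv_foldl_mem_dedup]
  have hg0 : ∀ (u : Int) (b : List Int),
      b ∈ (fun u => ((y.zip x).filter (fun p => p.2 == u)).map (fun p => [u, p.1])) u →
      PySem.List.pyGetD b 0 0 = u := by
    intro u b hb
    obtain ⟨p, _, rfl⟩ := List.mem_map.mp hb
    rfl
  rw [pv_ofList_flatMap (PySem.Set.ofList x) _ (fun b => PySem.List.pyGetD b 0 0)
    (PySem.Set.nodup_ofList x) hg0]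
  have hblock : (fun u => PySem.Set.ofList
        (((y.zip x).filter (fun p => p.2 == u)).map (fun p => [u, p.1])))
      = pvBlockW (y.zip x) := by
    funext u
    unfold pvBlockW
    rw [PySem.List.dedup_eq_ofList,
      show ((y.zip x).filter (fun p => p.2 == u)).map (fun p => ([u, p.1] : List Int))
        = (((y.zip x).filter (fun p => p.2 == u)).map Prod.fst).map (fun v => [u, v]) by
          rw [List.map_map]; rfl,
      pv_ofList_map_inj (fun v => ([u, v] : List Int)) (fun a b hab => by simpa using hab)]
  rw [hblock]
  -- full lexicographic sort of the deduplicated pairs: name the result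
  have hperm : (PySem.List.sorted (PySem.Set.ofList x) (fun u => u) false).Perm (PySem.Set.ofList x) :=
    PySem.List.sorted_perm _ _ _
  have hndS : (PySem.List.sorted (PySem.Set.ofList x) (fun u => u) false).Nodup :=
    (hperm.symm).nodup (PySem.Set.nodup_ofList x)
  have hS : (PySem.List.sorted (PySem.Set.ofList x) (fun u => u) false).Pairwise (· < ·) :=
    PySem.List.sorted_ofList_pairwise_lt x
  have hPerm : (List.flatMap (pvBlockWS (y.zip x)) (PySem.List.sorted (PySem.Set.ofList x) (fun u => u) false)).Perm
      (List.flatMap (pvBlockW (y.zip x)) (PySem.Set.ofList x)) :=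
    List.Perm.flatMap hperm (fun u _ => List.Perm.map _ (PySem.List.sorted_perm _ _ _))
  have hPW : (List.flatMap (pvBlockWS (y.zip x)) (PySem.List.sorted (PySem.Set.ofList x) (fun u => u) false)).Pairwise
      (fun (a b : List Int) => a < b) := by
    apply pv_pairwise_flatMap _ _ _ (· < ·) hS
    · intro u _
      unfold pvBlockWS
      apply List.pairwise_map.mpr
      have h1 := PySem.List.sorted_pairwise
        (PySem.List.dedup ((( y.zip x).filter (fun p => p.2 == u)).map Prod.fst)) (fun v => v)
      have h2 : (PySem.List.sorted
          (PySem.List.dedup (((y.zip x).filter (fun p => p.2 == u)).map Prod.fst)) (fun v => v) false).Nodup :=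
        ((PySem.List.sorted_perm _ _ _).symm).nodup (by
          rw [PySem.List.dedup_eq_ofList]; exact PySem.Set.nodup_ofList _)
      exact ((h1.and h2).imp (fun hab => by
        exact List.Lex.cons (List.Lex.rel (lt_of_le_of_ne hab.1 hab.2))))
    · intro u v huv a ha b hb
      unfold pvBlockWS at ha hb
      obtain ⟨va, _, rfl⟩ := List.mem_map.mp ha
      obtain ⟨vb, _, rfl⟩ := List.mem_map.mp hb
      exact List.Lex.rel huv
  have := PySem.List.sorted_eq_of_perm_of_pairwise_lt
    (List.flatMap (pvBlockW (y.zip x)) (PySem.Set.ofList x))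
    (List.flatMap (pvBlockWS (y.zip x)) (PySem.List.sorted (PySem.Set.ofList x) (fun u => u) false))
    (fun p => p) hPerm hPW
  convert this using 2

theorem pv_B_else (x y : List Int) (w : String) (hw : (w == "height") = false)
    (h : x.length ≤ y.length) :
    x_or_y_center_coordinates_alt x y w
    = (PySem.List.sorted (PySem.Set.ofList x) (fun u => u) false).flatMap (pvBlockWS (y.zip x)) := by
  have hD : (PySem.List.pyRange 0 (x.length : Int) 1).foldl (fun d i =>
        let xv := PySem.List.pyGetD x i 0
        let yv := PySem.List.pyGetD y i 0
        let g := d.getD xv []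
        if yv ∈ g then d else d.insert xv (g ++ [yv])) PySem.Dict.empty
      = (y.zip x).foldl (fun d p =>
        let g := d.getD p.2 []
        if p.1 ∈ g then d else d.insert p.2 (g ++ [p.1])) PySem.Dict.empty :=
    pv_foldl_idx_zip y x
      (fun d yv xv => if yv ∈ d.getD xv [] then d else d.insert xv (d.getD xv [] ++ [yv]))
      PySem.Dict.empty h
  unfold x_or_y_center_coordinates_alt
  simp only [hw, Bool.false_eq_true, if_false]
  rw [hD]
  obtain ⟨hk, hg⟩ := pv_dict_fold (y.zip x)
  rw [hk, List.map_snd_zip h]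
  have hemit : ∀ (S : List Int) (D : PySem.Dict Int (List Int)),
      S.foldl (fun res u => (PySem.List.sorted (D.getD u []) (fun k => k) false).foldl
        (fun res v => res ++ [[u, v]]) res) []
      = S.flatMap (fun u => (PySem.List.sorted (D.getD u []) (fun k => k) false).map (fun v => [u, v])) := by
    intro S D
    calc S.foldl (fun res u => (PySem.List.sorted (D.getD u []) (fun k => k) false).foldl
        (fun res v => res ++ [[u, v]]) res) []
        = S.foldl (fun res u =>
            res ++ (PySem.List.sorted (D.getD u []) (fun k => k) false).map (fun v => [u, v])) [] := by
          apply PySem.List.foldl_congr_mem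
          intro res u _
          exact PySem.List.foldl_append_singleton_eq_map (fun v => [u, v]) _ res
      _ = _ := by
          rw [PySem.List.foldl_append_eq_flatMap]; simp
  rw [hemit]
  apply List.flatMap_congr
  intro u _
  rw [hg u]
  rfl

-- ===== VERDICT (by name: the statement is the Claim_ definition above) =====
theorem x_or_y_center_coordinates_spec : Claim_equal_x_or_y_center_coordinates := by
  intro x y w _ hpre
  unfold Spec_x_or_y_center_coordinates
  by_cases hw : w = "height"
  · subst hw
    have h : y.length ≤ x.length := by simpa [Pre_x_or_y_center_coordinates] using hpre
    rw [pv_A_height x y h, pv_B_height x y h]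
  · have hwb : (w == "height") = false := by simpa using hw
    have h : x.length ≤ y.length := by simpa [Pre_x_or_y_center_coordinates, hw] using hpre
    rw [pv_A_else x y w hwb h, pv_B_else x y w hwb h]
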